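-- pv_equiv track=rewrite | github.com/RuanVitorr/atividades-de-Computabilidade-e-Complexidade-de-Algortimos | att25.py | afn_a_antes_b
-- ===== SOURCE A (Python) =====
-- def afn_a_antes_b(palavra):
--     estado = 'q0'
--
--     for char in palavra:
--         if estado == 'q0':
--             if char == 'a':
--                 estado = 'q0'
--             elif char == 'b':
--                 estado = 'q1'
--             else:
--                 return 'palavra invalida (caractere inválido)'
--
--         elif estado == 'q1':
--             if char == 'b':
--                 estado = 'q1'
--             else:
--                 return 'palavra invalida (caractere inválido)'
--
--     if estado in ['q1', 'q0']:
--         return "palavra valida (todas as 'a's aparecem antes das 'b's)"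
--     else:
--         return "palavra invalida (não atende aos critérios)"
-- ===== SOURCE B (Python) =====
-- def afn_a_antes_b(palavra):
--     if all(c == 'b' for c in palavra.lstrip('a')):
--         return "palavra valida (todas as 'a's aparecem antes das 'b's)"
--     return 'palavra invalida (caractere inválido)'
-- ===== Notes on version B (the rewrite author's own statement) =====
-- stated objective: idiomatic
-- what changed: Replaces the explicit DFA state loop with a direct predicate: strip the leading a's and check the remainder is all b's (the 'nao atende' branch of A is unreachable, so two messages suffice).
import Mathlib
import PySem

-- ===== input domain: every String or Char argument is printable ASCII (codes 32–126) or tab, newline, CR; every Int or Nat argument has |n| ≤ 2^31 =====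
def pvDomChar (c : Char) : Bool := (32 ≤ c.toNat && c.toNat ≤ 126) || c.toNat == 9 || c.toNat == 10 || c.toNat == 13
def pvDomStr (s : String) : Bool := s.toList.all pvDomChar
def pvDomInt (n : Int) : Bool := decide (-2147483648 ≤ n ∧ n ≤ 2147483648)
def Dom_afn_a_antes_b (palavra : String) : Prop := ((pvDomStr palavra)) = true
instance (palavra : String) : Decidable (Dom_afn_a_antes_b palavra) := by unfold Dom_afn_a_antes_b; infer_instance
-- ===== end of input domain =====

-- B drops the explicit DFA state: strip the leading a's and check the rest is all b's (idiomatic; A's 'não atende' branch is unreachable).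

-- ===== PORT A =====
-- the for-loop with early return, state 'estado' threaded through
def afnLoop : List Char → String → String
  | [], estado =>
      if ["q1", "q0"].contains estado then
        "palavra valida (todas as 'a's aparecem antes das 'b's)"
      else
        "palavra invalida (não atende aos critérios)"
  | c :: rest, estado =>
      if estado == "q0" then
        if c == 'a' then afnLoop rest "q0"
        else if c == 'b' then afnLoop rest "q1"
        else "palavra invalida (caractere inválido)"
      else if estado == "q1" then
        if c == 'b' then afnLoop rest "q1"
        else "palavra invalida (caractere inválido)"
      else afnLoop rest estado

def afn_a_antes_b (palavra : String) : String := afnLoop palavra.toList "q0"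

-- ===== PORT B =====
-- palavra.lstrip('a') is ported by hand as dropWhile (· == 'a'): exact, lstrip with a
-- chars argument removes exactly the leading characters drawn from that set.
def afn_a_antes_b_alt (palavra : String) : String :=
  if (palavra.toList.dropWhile (fun c => c == 'a')).all (fun c => c == 'b') then
    "palavra valida (todas as 'a's aparecem antes das 'b's)"
  else
    "palavra invalida (caractere inválido)"

-- ===== PRECONDITION & SPEC =====
def Spec_afn_a_antes_b (palavra : String) (out : String) : Prop := out = afn_a_antes_b_alt palavra
instance (palavra : String) (out : String) : Decidable (Spec_afn_a_antes_b palavra out) := by unfold Spec_afn_a_antes_b; infer_instance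

-- ===== CLAIM (what is proved, stated in full; the proofs are below) =====
def Claim_equal_afn_a_antes_b : Prop := ∀ (palavra : String), Dom_afn_a_antes_b palavra → Spec_afn_a_antes_b palavra (afn_a_antes_b palavra)

-- ===== LEMMAS AND PROOFS =====

theorem afnLoop_q1 (cs : List Char) :
    afnLoop cs "q1" =
      if cs.all (fun c => c == 'b') then
        "palavra valida (todas as 'a's aparecem antes das 'b's)"
      else "palavra invalida (caractere inválido)" := by
  induction cs with
  | nil => simp [afnLoop]
  | cons c rest ih =>
      by_cases hc : c = 'b' <;> simp [afnLoop, hc, ih]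

theorem afnLoop_q0 (cs : List Char) :
    afnLoop cs "q0" =
      if (cs.dropWhile (fun c => c == 'a')).all (fun c => c == 'b') then
        "palavra valida (todas as 'a's aparecem antes das 'b's)"
      else "palavra invalida (caractere inválido)" := by
  induction cs with
  | nil => simp [afnLoop]
  | cons c rest ih =>
      by_cases ha : c = 'a'
      · simp [afnLoop, ha, ih, List.dropWhile]
      · by_cases hb : c = 'b'
        · simp [afnLoop, hb, afnLoop_q1, List.dropWhile]
        · have hca : (c == 'a') = false := by simp [ha]
          have hcb : (c == 'b') = false := by simp [hb]
          simp only [afnLoop, hca, hcb, List.dropWhile, if_false, Bool.false_eq_true,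
            String.reduceBEq, if_true]
          rw [if_neg]
          simp [hcb]

-- ===== VERDICT (by name: the statement is the Claim_ definition above) =====
theorem afn_a_antes_b_spec : Claim_equal_afn_a_antes_b := by
  intro palavra _
  unfold Spec_afn_a_antes_b afn_a_antes_b afn_a_antes_b_alt
  rw [afnLoop_q0]
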